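-- pv_equiv track=rewrite | github.com/GailenTech/gozain-cybersecurity-portal | backend/modules/auth/auth_middleware.py | check_permissions
-- ===== SOURCE A (Python) =====
-- def check_permissions(user_permissions: dict, required_permissions: list) -> bool:
--     """Verificar si el usuario tiene los permisos requeridos"""
--     if not required_permissions:
--         return True
--
--     # Formato: ["module:action", "module:action"]
--     for permission in required_permissions:
--         if ':' not in permission:
--             continue
--
--         module, action = permission.split(':', 1)
--         module_perms = user_permissions.get(module, [])
--
--         if action not in module_perms:
--             return False
--
--     return True
-- ===== SOURCE B (Python) =====
-- def check_permissions(user_permissions: dict, required_permissions: list) -> bool: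
--     """Verificar si el usuario tiene los permisos requeridos"""
--     # Invert: group the well-formed requirements by module, then verify each
--     # module once with a single lookup and a subset test.
--     pairs = [p.split(':', 1) for p in required_permissions if ':' in p]
--     by_module = {}
--     for module, action in pairs:
--         by_module.setdefault(module, []).append(action)
--     return all(set(actions) <= set(user_permissions.get(module, []))
--                for module, actions in by_module.items())
-- ===== Notes on version B (the rewrite author's own statement) =====
-- stated objective: alternative
-- what changed: Replaces A's per-requirement split-and-lookup loop with early return by an inverted index: the well-formed requirements are grouped by module into a dict, then each module is verified once with a single lookup and one subset test.
import Mathlib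
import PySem

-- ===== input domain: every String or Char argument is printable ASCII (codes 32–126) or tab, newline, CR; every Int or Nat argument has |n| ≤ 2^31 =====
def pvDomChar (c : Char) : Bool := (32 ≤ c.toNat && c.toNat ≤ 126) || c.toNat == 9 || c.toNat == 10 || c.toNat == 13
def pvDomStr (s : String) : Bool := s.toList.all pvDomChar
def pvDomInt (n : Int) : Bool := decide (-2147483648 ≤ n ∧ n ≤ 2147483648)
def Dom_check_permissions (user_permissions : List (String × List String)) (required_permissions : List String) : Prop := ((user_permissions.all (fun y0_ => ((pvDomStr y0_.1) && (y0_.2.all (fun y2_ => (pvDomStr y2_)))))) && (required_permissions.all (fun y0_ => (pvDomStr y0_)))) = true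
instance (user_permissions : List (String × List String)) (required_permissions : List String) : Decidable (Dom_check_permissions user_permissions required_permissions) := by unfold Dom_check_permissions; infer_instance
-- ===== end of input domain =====

-- B replaces A's per-requirement split-and-lookup loop with an inverted index: the well-formed
-- requirements are grouped by module into a dict, then each module is verified once with a single
-- lookup and one subset test (alternative structure, same cost class).

-- ===== PORT A =====
-- user_permissions.get(module, []) on the association list (first match, as a Python dict)
def pvGetDefault (d : List (String × List String)) (k : String) : List String :=
  match d with
  | [] => []
  | (k', v) :: rest => if k' == k then v else pvGetDefault rest k

-- the 'for permission in required_permissions' loop with its early 'return False'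
def pvCheckLoop (up : List (String × List String)) : List String → Bool
  | [] => true
  | permission :: rest =>
    if PySem.Str.isIn ":" permission = false then pvCheckLoop up rest
    else
      match (PySem.Str.splitMax? permission ":" 1).getD [] with
      | module :: action :: _ =>
        if (pvGetDefault up module).contains action then pvCheckLoop up rest else false
      | _ => false  -- unreachable: split(':', 1) with ':' present yields two parts

def check_permissions (user_permissions : List (String × List String)) (required_permissions : List String) : Bool :=
  if required_permissions.isEmpty then true
  else pvCheckLoop user_permissions required_permissions

-- ===== PORT B =====
-- p.split(':', 1) as a pair, for a p containing ':'
def pvPairOf (p : String) : String × String :=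
  match (PySem.Str.splitMax? p ":" 1).getD [] with
  | module :: action :: _ => (module, action)
  | _ => ("", "")  -- unreachable: pvPairOf is only applied to p containing ':'

def check_permissions_alt (user_permissions : List (String × List String)) (required_permissions : List String) : Bool :=
  let pairs := (required_permissions.filter (fun p => PySem.Str.isIn ":" p)).map pvPairOf
  let by_module := pairs.foldl (fun d q => d.modify q.1 [] (· ++ [q.2])) PySem.Dict.empty
  by_module.items.all (fun e =>
    PySem.Set.issubset (PySem.Set.ofList e.2) (PySem.Set.ofList (pvGetDefault user_permissions e.1)))

-- ===== PRECONDITION & SPEC =====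
def Spec_check_permissions (user_permissions : List (String × List String)) (required_permissions : List String) (out : Bool) : Prop := out = check_permissions_alt user_permissions required_permissions
instance (user_permissions : List (String × List String)) (required_permissions : List String) (out : Bool) : Decidable (Spec_check_permissions user_permissions required_permissions out) := by unfold Spec_check_permissions; infer_instance

-- ===== CLAIM (what is proved, stated in full; the proofs are below) =====
def Claim_equal_check_permissions : Prop := ∀ (user_permissions : List (String × List String)) (required_permissions : List String), Dom_check_permissions user_permissions required_permissions → Spec_check_permissions user_permissions required_permissions (check_permissions user_permissions required_permissions)

-- ===== LEMMAS AND PROOFS =====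

-- splitOnMax.go with maxsplit exhausted flushes the current piece
lemma pv_go_zero (fuel : Nat) (l cur : List Char) (acc : List (List Char)) :
    PySem.Chars.splitOnMax.go [':'] fuel 0 l cur acc = ((cur.reverse ++ l) :: acc).reverse := by
  cases fuel with
  | zero => rfl
  | succ f => cases l with
    | nil => simp [PySem.Chars.splitOnMax.go]
    | cons c rest => simp [PySem.Chars.splitOnMax.go]

-- with maxsplit = 1 and ':' present, go produces exactly two new pieces
lemma pv_go_one (l : List Char) : ∀ (fuel : Nat) (cur : List Char) (acc : List (List Char)),
    l.length < fuel → ':' ∈ l →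
    ∃ m a, PySem.Chars.splitOnMax.go [':'] fuel 1 l cur acc = acc.reverse ++ [m, a] := by
  induction l with
  | nil => intro fuel cur acc _ h; simp at h
  | cons c rest ih =>
    intro fuel cur acc hf hm
    cases fuel with
    | zero => omega
    | succ f =>
      by_cases hp : [':'].isPrefixOf (c :: rest) = true
      · refine ⟨cur.reverse, List.drop 1 (c :: rest), ?_⟩
        simp only [PySem.Chars.splitOnMax.go, hp, if_true]
        rw [show (1 : Nat) - 1 = 0 from rfl, pv_go_zero]
        simp
      · have hc : c ≠ ':' := by
          intro h; apply hp; subst h; simp [List.isPrefixOf]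
        have hm' : ':' ∈ rest := by
          cases hm with
          | head => exact absurd rfl hc
          | tail _ h => exact h
        have := ih f (c :: cur) acc (by simpa using Nat.lt_of_succ_lt_succ hf) hm'
        simpa only [PySem.Chars.splitOnMax.go, hp, if_false, Bool.false_eq_true] using this

-- a string containing ':' splits at maxsplit 1 into exactly two parts
lemma pv_split_shape (p : String) (h : PySem.Str.isIn ":" p = true) :
    ∃ m a, (PySem.Str.splitMax? p ":" 1).getD [] = [m, a] := by
  have hmem : ':' ∈ p.toList := by
    have := (PySem.Chars.isIn_iff_infix ":".toList p.toList).mp (by simpa [PySem.Str.isIn] using h)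
    exact (List.singleton_infix_iff ':' p.toList).mp (by simpa using this)
  obtain ⟨m, a, hgo⟩ := pv_go_one p.toList (p.toList.length + 1) [] [] (by omega) hmem
  have hchars : PySem.Chars.splitMax? p.toList ":".toList 1 = some [m, a] := by
    simp only [PySem.Chars.splitMax?, PySem.Chars.splitOnMax]
    norm_num
    simpa using hgo
  have hmap := PySem.Str.splitMax?_map p ":" 1
  rw [hchars] at hmap
  cases hs : PySem.Str.splitMax? p ":" 1 with
  | none => rw [hs] at hmap; simp at hmap
  | some xs =>
    rw [hs] at hmap
    simp only [Option.map_some, Option.some.injEq] at hmap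
    match xs, hmap with
    | [x, y], hmap =>
      exact ⟨x, y, by simp⟩

-- the A-side loop is an all-quantifier over the required permissions
lemma pv_loop_iff (up : List (String × List String)) (req : List String) :
    pvCheckLoop up req = true ↔
      ∀ p ∈ req, PySem.Str.isIn ":" p = true →
        (match (PySem.Str.splitMax? p ":" 1).getD [] with
         | module :: action :: _ => (pvGetDefault up module).contains action
         | _ => false) = true := by
  induction req with
  | nil => simp [pvCheckLoop]
  | cons p rest ih =>
    simp only [pvCheckLoop]
    by_cases hin : PySem.Str.isIn ":" p = true
    · simp only [hin, Bool.true_eq_false, if_false]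
      cases hsp : (PySem.Str.splitMax? p ":" 1).getD [] with
      | nil =>
        constructor
        · intro h; exact absurd h (by simp)
        · intro h; have := h p List.mem_cons_self hin; rw [hsp] at this; simp at this
      | cons m t =>
        cases t with
        | nil =>
          constructor
          · intro h; exact absurd h (by simp)
          · intro h; have := h p List.mem_cons_self hin; rw [hsp] at this; simp at this
        | cons a t2 =>
          by_cases hc : (pvGetDefault up m).contains a = true
          · simp only [hc, if_true, ih]
            constructor
            · intro h q hq hq2
              rcases List.mem_cons.mp hq with rfl | hq'
              · rw [hsp]; simpa using hc
              · exact h q hq' hq2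
            · intro h q hq hq2; exact h q (List.mem_cons_of_mem _ hq) hq2
          · simp only [hc, Bool.false_eq_true, if_false]
            constructor
            · intro h; simp at h
            · intro h
              have := h p List.mem_cons_self hin
              rw [hsp] at this
              exact absurd this hc
    · have hin' : PySem.Str.isIn ":" p = false := by
        cases hv : PySem.Str.isIn ":" p
        · rfl
        · exact absurd hv hin
      simp only [hin', if_true, ih]
      constructor
      · intro h q hq hq2
        rcases List.mem_cons.mp hq with rfl | hq'
        · exact absurd hq2 hin
        · exact h q hq' hq2
      · intro h q hq hq2; exact h q (List.mem_cons_of_mem _ hq) hq2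

-- B's grouped-and-subset test is the same all-quantifier over the pairs
lemma pv_alt_iff (up : List (String × List String)) (req : List String) :
    check_permissions_alt up req = true ↔
      ∀ q ∈ (req.filter (fun p => PySem.Str.isIn ":" p)).map pvPairOf,
        q.2 ∈ pvGetDefault up q.1 := by
  have hform : check_permissions_alt up req =
      (((req.filter (fun p => PySem.Str.isIn ":" p)).map pvPairOf).foldl
        (fun d q => d.modify q.1 [] (· ++ [q.2])) PySem.Dict.empty).items.all (fun e =>
          PySem.Set.issubset (PySem.Set.ofList e.2)
            (PySem.Set.ofList (pvGetDefault up e.1))) := rfl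
  rw [hform]
  set pairs := (req.filter (fun p => PySem.Str.isIn ":" p)).map pvPairOf with hpairs
  set d := pairs.foldl (fun d q => d.modify q.1 [] (· ++ [q.2])) PySem.Dict.empty with hd
  have hnd : d.keys.Nodup := by
    exact PySem.Dict.nodup_keys_foldl_modify_key pairs Prod.fst []
      (fun d q => (· ++ [q.2])) PySem.Dict.empty PySem.Dict.nodup_keys_empty
  have hkeys : d.keys = PySem.Set.ofList (pairs.map Prod.fst) := by
    rw [hd, PySem.Dict.keys_foldl_modify_key pairs Prod.fst [] (fun d q => (· ++ [q.2]))
          PySem.Dict.empty]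
    simp [PySem.Set.update_nil_left]
  have hgetD : ∀ m, d.getD m [] = (pairs.filter (fun q => q.1 == m)).map (·.2) := by
    intro m
    rw [hd, PySem.Dict.getD_foldl_modify_append]
    simp
  rw [PySem.Dict.items_eq_map_keys d hnd []]
  rw [List.all_eq_true]
  constructor
  · intro h q hq
    have hm : q.1 ∈ d.keys := by
      rw [hkeys, PySem.Set.mem_ofList]
      exact List.mem_map_of_mem hq
    have := h _ (List.mem_map_of_mem hm)
    rw [PySem.Set.issubset_iff] at this
    have ha : q.2 ∈ PySem.Set.ofList (d.getD q.1 []) := by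
      rw [PySem.Set.mem_ofList, hgetD]
      exact List.mem_map_of_mem (List.mem_filter.mpr ⟨hq, by simp⟩)
    have := this _ ha
    rwa [PySem.Set.mem_ofList] at this
  · intro h e he
    obtain ⟨m, hm, rfl⟩ := List.mem_map.mp he
    rw [PySem.Set.issubset_iff]
    intro a ha
    rw [PySem.Set.mem_ofList, hgetD] at ha
    obtain ⟨q, hq, rfl⟩ := List.mem_map.mp ha
    have hq' := List.mem_filter.mp hq
    have hqm : q.1 = m := by simpa using hq'.2
    rw [PySem.Set.mem_ofList, ← hqm]
    exact h q hq'.1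

-- ===== VERDICT (by name: the statement is the Claim_ definition above) =====
theorem check_permissions_spec : Claim_equal_check_permissions := by
  intro up req _
  unfold Spec_check_permissions
  unfold check_permissions
  rw [Bool.eq_iff_iff, pv_alt_iff]
  by_cases hreq : req.isEmpty
  · simp only [hreq, if_true, true_iff]
    intro q hq
    rw [List.isEmpty_iff] at hreq; subst hreq
    simp at hq
  · simp only [hreq, Bool.false_eq_true, if_false]
    rw [pv_loop_iff]
    constructor
    · intro h q hq
      obtain ⟨p, hp, rfl⟩ := List.mem_map.mp hq
      have hp' := List.mem_filter.mp hp
      obtain ⟨m, a, hsp⟩ := pv_split_shape p hp'.2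
      have := h p hp'.1 hp'.2
      rw [hsp] at this
      unfold pvPairOf
      rw [hsp]
      simpa [List.contains_eq_mem] using this
    · intro h p hp hin
      obtain ⟨m, a, hsp⟩ := pv_split_shape p hin
      have hq : pvPairOf p ∈ (req.filter (fun p => PySem.Str.isIn ":" p)).map pvPairOf :=
        List.mem_map_of_mem (List.mem_filter.mpr ⟨hp, hin⟩)
      have := h _ hq
      unfold pvPairOf at this
      rw [hsp] at this
      rw [hsp]
      simpa [List.contains_eq_mem] using this
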